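-- pv_equiv track=rewrite | github.com/ynsgnr/mixer | preprocessing/data_processing.py | get_categorized
-- ===== SOURCE A (Python) =====
-- def get_categorized(categories):
--     categories_dict = {}
--     categories_dict_subs = {}
--     for i,category in enumerate(categories):
--         if not category[-1] in categories_dict:
--             categories_dict[category[-1]]=1
--             categories_dict_subs[category[-1]]=[i]
--         else:
--             categories_dict[category[-1]]+=1
--             categories_dict_subs[category[-1]].append(i)
--     return categories_dict, categories_dict_subs
-- ===== SOURCE B (Python) =====
-- def get_categorized(categories):
--     keys = []
--     for category in categories:
--         k = category[-1]
--         if k not in keys: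
--             keys.append(k)
--     subs = {k: [i for i, c in enumerate(categories) if c[-1] == k] for k in keys}
--     counts = {k: len(v) for k, v in subs.items()}
--     return counts, subs
-- ===== Notes on version B (the rewrite author's own statement) =====
-- stated objective: alternative
-- what changed: B replaces A's single hash-grouping pass (two parallel dict updates per element) with a staged nested-scan algorithm: first a dedup pass collecting the distinct last elements in first-occurrence order, then for each key a comprehension scanning the enumerated list to collect its indices, and finally counts derived as lengths.
import Mathlib
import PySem

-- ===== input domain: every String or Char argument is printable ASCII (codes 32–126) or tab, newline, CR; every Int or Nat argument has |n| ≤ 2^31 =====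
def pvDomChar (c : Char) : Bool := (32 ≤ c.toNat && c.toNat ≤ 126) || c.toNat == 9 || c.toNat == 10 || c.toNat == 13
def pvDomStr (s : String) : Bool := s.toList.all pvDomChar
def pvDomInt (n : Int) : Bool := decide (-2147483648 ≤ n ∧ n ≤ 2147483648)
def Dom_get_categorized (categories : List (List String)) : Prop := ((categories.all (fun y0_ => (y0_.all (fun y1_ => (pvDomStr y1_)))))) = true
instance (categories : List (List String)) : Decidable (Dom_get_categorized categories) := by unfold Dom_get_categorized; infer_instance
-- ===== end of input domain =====

-- B: staged nested-scan algorithm (dedup keys, then per-key index scans, counts as lengths)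
-- instead of A's single hash-grouping pass; same values, no speed claim.

-- ===== PORT A =====
-- category[-1]: Python raises IndexError on an empty inner list; Pre_ excludes that, the
-- .getD "" default is never reached on admitted inputs.
def get_categorized (categories : List (List String)) : (List (String × Int)) × (List (String × List Int)) :=
  let st := (PySem.List.enumerate categories).foldl
    (fun (st : PySem.Dict String Int × PySem.Dict String (List Int)) p =>
      let c := (PySem.List.pyGet? p.2 (-1)).getD ""
      if ¬ (st.1.contains c = true) then
        (st.1.insert c 1, st.2.insert c [p.1])
      else
        (st.1.modify c 0 (· + 1), st.2.modify c [] (· ++ [p.1])))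
    (PySem.Dict.empty, PySem.Dict.empty)
  (st.1.items, st.2.items)

-- ===== PORT B =====
def get_categorized_alt (categories : List (List String)) : (List (String × Int)) × (List (String × List Int)) :=
  let keys := categories.foldl
    (fun (ks : List String) category =>
      let k := (PySem.List.pyGet? category (-1)).getD ""
      if ks.contains k then ks else ks ++ [k]) []
  let subs := keys.map (fun k =>
    (k, (PySem.List.enumerate categories).filterMap
      (fun p => if ((PySem.List.pyGet? p.2 (-1)).getD "" == k) then some p.1 else none)))
  let counts := subs.map (fun kv => (kv.1, (kv.2.length : Int)))
  (counts, subs)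

-- ===== PRECONDITION & SPEC =====
-- Pre_ excludes inputs containing an empty inner list, on which Python A raises IndexError.
def Pre_get_categorized (categories : List (List String)) : Prop :=
  ∀ c ∈ categories, c ≠ []
instance (categories : List (List String)) : Decidable (Pre_get_categorized categories) := by unfold Pre_get_categorized; infer_instance

def pvWitness_get_categorized : List (List String) := [["x", "a"], ["b"], ["c", "a"]]

def Spec_get_categorized (categories : List (List String)) (out : (List (String × Int)) × (List (String × List Int))) : Prop := out = get_categorized_alt categories
instance (categories : List (List String)) (out : (List (String × Int)) × (List (String × List Int))) : Decidable (Spec_get_categorized categories out) := by unfold Spec_get_categorized; infer_instance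

-- ===== CLAIM (what is proved, stated in full; the proofs are below) =====
def Claim_equal_get_categorized : Prop := ∀ (categories : List (List String)), Dom_get_categorized categories → Pre_get_categorized categories → Spec_get_categorized categories (get_categorized categories)

-- ===== LEMMAS AND PROOFS =====

-- the key extracted from one inner list
def lastKey (category : List String) : String := (PySem.List.pyGet? category (-1)).getD ""

-- counts dict derived from a grouping dict: same keys in the same order, lengths as values
def deriveD (s : PySem.Dict String (List Int)) : PySem.Dict String Int :=
  PySem.Dict.mk (s.items.map (fun kv => (kv.1, (kv.2.length : Int))))

theorem get?_deriveD (s : PySem.Dict String (List Int)) (c : String) :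
    (deriveD s).get? c = (s.get? c).map (fun v => (v.length : Int)) := by
  obtain ⟨l⟩ := s
  induction l with
  | nil => simp [deriveD, PySem.Dict.get?]
  | cons kv rest ih =>
    obtain ⟨k, v⟩ := kv
    by_cases h : (k == c) = true
    · simp [deriveD, PySem.Dict.get?_mk_cons, h]
    · simp only [deriveD, List.map_cons, PySem.Dict.get?_mk_cons, h,
        Bool.false_eq_true, if_false]
      exact ih

theorem contains_deriveD (s : PySem.Dict String (List Int)) (c : String) :
    (deriveD s).contains c = s.contains c := by
  rw [PySem.Dict.contains_eq_isSome_get?, PySem.Dict.contains_eq_isSome_get?, get?_deriveD]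
  cases s.get? c <;> rfl

theorem getD_deriveD (s : PySem.Dict String (List Int)) (c : String) :
    (deriveD s).getD c 0 = ((s.getD c []).length : Int) := by
  unfold PySem.Dict.getD
  rw [get?_deriveD]
  cases s.get? c <;> rfl

theorem deriveD_insert (s : PySem.Dict String (List Int)) (c : String) (v : List Int) :
    deriveD (s.insert c v) = (deriveD s).insert c (v.length : Int) := by
  apply PySem.Dict.ext
  show ((s.insert c v).items).map (fun kv => (kv.1, (kv.2.length : Int))) = _
  rw [PySem.Dict.items_insert, PySem.Dict.items_insert, contains_deriveD]
  by_cases h : s.contains c = true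
  · simp only [h, if_true, deriveD, List.map_map]
    apply List.map_congr_left
    intro p _
    by_cases hp : p.1 = c <;> simp [hp]
  · simp [h, deriveD]

theorem getD_eq_of_not_contains (s : PySem.Dict String (List Int)) (c : String)
    (h : ¬ s.contains c = true) : s.getD c [] = [] := by
  rw [PySem.Dict.contains_eq_isSome_get?] at h
  unfold PySem.Dict.getD
  cases hg : s.get? c
  · rfl
  · rw [hg] at h; simp at h

-- one loop step of A: the paired update equals a single grouping update with the count derived
theorem step_eq (s : PySem.Dict String (List Int)) (p : Int × List String) :
    (let c := (PySem.List.pyGet? p.2 (-1)).getD ""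
     if ¬ ((deriveD s).contains c = true) then
       ((deriveD s).insert c 1, s.insert c [p.1])
     else
       ((deriveD s).modify c 0 (· + 1), s.modify c [] (· ++ [p.1])))
    = (deriveD (s.modify ((PySem.List.pyGet? p.2 (-1)).getD "") [] (· ++ [p.1])),
       s.modify ((PySem.List.pyGet? p.2 (-1)).getD "") [] (· ++ [p.1])) := by
  set c := (PySem.List.pyGet? p.2 (-1)).getD "" with hc
  simp only [PySem.Dict.modify, contains_deriveD]
  by_cases h : s.contains c = true
  · simp only [h, not_true, if_neg, not_false_eq_true]
    rw [deriveD_insert, getD_deriveD]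
    simp
  · simp only [h]
    rw [getD_eq_of_not_contains s c h, deriveD_insert]
    simp

theorem foldl_pair (l : List (Int × List String)) (s : PySem.Dict String (List Int)) :
    l.foldl
      (fun (st : PySem.Dict String Int × PySem.Dict String (List Int)) p =>
        let c := (PySem.List.pyGet? p.2 (-1)).getD ""
        if ¬ (st.1.contains c = true) then
          (st.1.insert c 1, st.2.insert c [p.1])
        else
          (st.1.modify c 0 (· + 1), st.2.modify c [] (· ++ [p.1])))
      (deriveD s, s)
    = (deriveD (l.foldl (fun d p => d.modify ((PySem.List.pyGet? p.2 (-1)).getD "") [] (· ++ [p.1])) s),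
       l.foldl (fun d p => d.modify ((PySem.List.pyGet? p.2 (-1)).getD "") [] (· ++ [p.1])) s) := by
  induction l generalizing s with
  | nil => rfl
  | cons p rest ih =>
    simp only [List.foldl_cons]
    rw [step_eq s p]
    exact ih _

-- A's grouping fold, over key/index pairs
def groupFold (l : List (String × Int)) : PySem.Dict String (List Int) :=
  l.foldl (fun d q => d.modify q.1 [] (· ++ [q.2])) PySem.Dict.empty

theorem groupFold_eq (l : List (Int × List String)) :
    l.foldl (fun d p => d.modify ((PySem.List.pyGet? p.2 (-1)).getD "") [] (· ++ [p.1]))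
      PySem.Dict.empty
    = groupFold (l.map (fun p => (lastKey p.2, p.1))) := by
  unfold groupFold lastKey
  rw [List.foldl_map]

theorem keys_groupFold (l : List (String × Int)) :
    (groupFold l).keys = PySem.Set.ofList (l.map (·.1)) := by
  unfold groupFold
  rw [PySem.Dict.keys_foldl_modify_key l Prod.fst [] (fun d q => (· ++ [q.2])) PySem.Dict.empty]
  simp [PySem.Set.ofList_eq_foldl, PySem.Set.update, PySem.Dict.keys_empty]

theorem nodup_keys_groupFold (l : List (String × Int)) : (groupFold l).keys.Nodup := by
  unfold groupFold
  exact PySem.Dict.nodup_keys_foldl_modify_key l Prod.fst [] (fun d q => (· ++ [q.2]))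
    PySem.Dict.empty (by simp [PySem.Dict.keys_empty])

theorem getD_groupFold (l : List (String × Int)) (c : String) :
    (groupFold l).getD c [] = (l.filter (fun q => q.1 == c)).map (·.2) := by
  unfold groupFold
  rw [PySem.Dict.getD_foldl_modify_append]
  simp [PySem.Dict.getD_empty]

theorem items_groupFold (l : List (String × Int)) :
    (groupFold l).items
    = (PySem.Set.ofList (l.map (·.1))).map
        (fun k => (k, (l.filter (fun q => q.1 == k)).map (·.2))) := by
  rw [PySem.Dict.items_eq_map_keys (groupFold l) (nodup_keys_groupFold l) []]
  rw [keys_groupFold]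
  apply List.map_congr_left
  intro k _
  rw [getD_groupFold]

-- B's dedup pass computes set-of-keys in first-occurrence order
theorem keysB_eq (categories : List (List String)) :
    categories.foldl
      (fun (ks : List String) category =>
        let k := (PySem.List.pyGet? category (-1)).getD ""
        if ks.contains k then ks else ks ++ [k]) []
    = PySem.Set.ofList (categories.map lastKey) := by
  have hfun : (fun (ks : List String) category =>
      let k := (PySem.List.pyGet? category (-1)).getD ""
      if ks.contains k then ks else ks ++ [k])
      = (fun (ks : List String) c => PySem.Set.add ks (lastKey c)) := by
    funext ks c
    simp [PySem.Set.add, PySem.Set.contains, lastKey, List.contains_eq_mem]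
  rw [hfun, PySem.Set.ofList_eq_foldl, ← List.foldl_map]

-- B's per-key comprehension equals the filter/map over key/index pairs
theorem filterMap_eq (l : List (Int × List String)) (k : String) :
    l.filterMap (fun p => if ((PySem.List.pyGet? p.2 (-1)).getD "" == k) then some p.1 else none)
    = ((l.map (fun p => (lastKey p.2, p.1))).filter (fun q => q.1 == k)).map (·.2) := by
  induction l with
  | nil => rfl
  | cons p rest ih =>
    simp only [lastKey] at ih ⊢
    simp only [List.filterMap_cons, List.map_cons, List.filter_cons]
    by_cases h : ((PySem.List.pyGet? p.2 (-1)).getD "" == k) = true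
    · simp only [h, if_true, List.map_cons, ih]
    · simp only [h, Bool.false_eq_true, if_false, ih]

-- keys of the mapped enumerate list are the keys of the inner lists
theorem map_fst_enumMap (categories : List (List String)) : ∀ (s : Int),
    ((PySem.List.enumerate categories s).map (fun p => (lastKey p.2, p.1))).map (·.1)
    = categories.map lastKey := by
  induction categories with
  | nil => intro s; simp [PySem.List.enumerate_nil]
  | cons x xs ih => intro s; simp only [PySem.List.enumerate_cons, List.map_cons, ih]

-- ===== VERDICT (by name: the statement is the Claim_ definition above) =====
theorem get_categorized_spec : Claim_equal_get_categorized := by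
  intro categories _ _
  unfold Spec_get_categorized get_categorized get_categorized_alt
  have hbase : (PySem.Dict.empty : PySem.Dict String Int) = deriveD PySem.Dict.empty := rfl
  rw [hbase, foldl_pair, groupFold_eq]
  set l := (PySem.List.enumerate categories).map (fun p => (lastKey p.2, p.1)) with hl
  have hsubs : (groupFold l).items
      = (categories.foldl
          (fun (ks : List String) category =>
            let k := (PySem.List.pyGet? category (-1)).getD ""
            if ks.contains k then ks else ks ++ [k]) []).map
          (fun k => (k, (PySem.List.enumerate categories).filterMap
            (fun p => if ((PySem.List.pyGet? p.2 (-1)).getD "" == k) then some p.1 else none))) := by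
    rw [items_groupFold, keysB_eq, hl, map_fst_enumMap categories 0]
    apply List.map_congr_left
    intro k _
    rw [filterMap_eq]
  refine Prod.ext ?_ ?_
  · show (deriveD (groupFold l)).items = _
    unfold deriveD
    show ((groupFold l).items).map _ = _
    rw [hsubs]
  · exact hsubs
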